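-- pv_equiv track=rewrite | github.com/Luecx/OpenEloSite | server/app/services/pgn_service.py | split_pgn_blocks
-- ===== SOURCE A (Python) =====
-- def split_pgn_blocks(pgn_text: str) -> list[str]:
--     normalized = (pgn_text or "").replace("\r\n", "\n").replace("\r", "\n").strip()
--     if not normalized:
--         return []
--
--     blocks: list[str] = []
--     current: list[str] = []
--     for line in normalized.split("\n"):
--         if line.startswith("[Event ") and current:
--             blocks.append("\n".join(current).strip())
--             current = []
--         current.append(line)
--     if current:
--         blocks.append("\n".join(current).strip())
--     return [block for block in blocks if block]
-- ===== SOURCE B (Python) =====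
-- def split_pgn_blocks(pgn_text: str) -> list[str]:
--     normalized = (pgn_text or "").replace("\r\n", "\n").replace("\r", "\n").strip()
--     if not normalized:
--         return []
--     lines = normalized.split("\n")
--     blocks: list[str] = []
--     i = 0
--     while i < len(lines):
--         j = i + 1
--         while j < len(lines) and not lines[j].startswith("[Event "):
--             j += 1
--         block = "\n".join(lines[i:j]).strip()
--         if block:
--             blocks.append(block)
--         i = j
--     return blocks
-- ===== Notes on version B (the rewrite author's own statement) =====
-- stated objective: alternative
-- what changed: B replaces A's line-accumulator fold (maintaining a 'current' buffer, flushing it on each '[Event ' line, then a final flush and a filtering pass) with a direct chunking scan: it advances an index to the next '[Event ' boundary, joins each slice of lines in one step, and filters empty blocks inline, with no buffer state and no separate filter pass.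
import Mathlib
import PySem

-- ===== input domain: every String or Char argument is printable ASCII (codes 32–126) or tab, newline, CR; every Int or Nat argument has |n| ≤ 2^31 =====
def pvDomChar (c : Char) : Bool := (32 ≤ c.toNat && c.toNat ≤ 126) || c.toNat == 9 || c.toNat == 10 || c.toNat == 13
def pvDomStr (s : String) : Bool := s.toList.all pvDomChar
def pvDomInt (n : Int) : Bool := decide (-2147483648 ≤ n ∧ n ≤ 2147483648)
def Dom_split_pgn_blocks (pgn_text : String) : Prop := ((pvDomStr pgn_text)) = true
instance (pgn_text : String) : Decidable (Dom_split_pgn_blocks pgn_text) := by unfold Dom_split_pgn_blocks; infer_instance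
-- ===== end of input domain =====

-- B replaces A's 'current'-buffer fold + final flush + filter pass with a direct chunking
-- scan that joins each slice between '[Event ' boundaries and filters inline (alternative
-- decomposition, same cost).

-- shared one-expression helpers (each is a literal Python expression of its source):
-- '"\n".join(xs).strip()'
def pvJS (xs : List String) : String := PySem.Str.strip (PySem.Str.join "\n" xs)
-- 'not line.startswith("[Event ")'
def pvNotEvent (s : String) : Bool := !PySem.Str.startswith s "[Event "

-- ===== PORT A =====
-- the body of A's for-loop over (blocks, current)
def pvF (st : List String × List String) (line : String) : List String × List String :=
  if PySem.Str.startswith line "[Event " && !st.2.isEmpty then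
    (st.1 ++ [pvJS st.2], [line])
  else
    (st.1, st.2 ++ [line])

-- A's trailing 'if current: blocks.append(...)'
def pvFinish (st : List String × List String) : List String :=
  if !st.2.isEmpty then st.1 ++ [pvJS st.2] else st.1

def split_pgn_blocks (pgn_text : String) : List String :=
  let normalized := PySem.Str.strip
    (PySem.Str.replace (PySem.Str.replace pgn_text "\r\n" "\n") "\r" "\n")
  if normalized = "" then []
  else
    let lines := (PySem.Str.split? normalized "\n").getD []  -- sep "\n" ≠ "": never none
    let blocks := pvFinish (lines.foldl pvF ([], []))
    blocks.filter (fun b => b ≠ "")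

-- ===== PORT B =====
-- B's outer while loop; the inner while scan to the next '[Event ' line is the
-- takeWhile/dropWhile split of the tail.
def pvChunks (lines : List String) : List String :=
  match lines with
  | [] => []
  | l :: rest =>
    let body := rest.takeWhile pvNotEvent
    let rest' := rest.dropWhile pvNotEvent
    let block := pvJS (l :: body)
    (if block = "" then [] else [block]) ++ pvChunks rest'
termination_by lines.length
decreasing_by
  simp only [List.length_cons]
  exact Nat.lt_succ_of_le (List.length_dropWhile_le _ _)

def split_pgn_blocks_alt (pgn_text : String) : List String :=
  let normalized := PySem.Str.strip
    (PySem.Str.replace (PySem.Str.replace pgn_text "\r\n" "\n") "\r" "\n")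
  if normalized = "" then []
  else pvChunks ((PySem.Str.split? normalized "\n").getD [])

-- ===== PRECONDITION & SPEC =====
def Spec_split_pgn_blocks (pgn_text : String) (out : List String) : Prop := out = split_pgn_blocks_alt pgn_text
instance (pgn_text : String) (out : List String) : Decidable (Spec_split_pgn_blocks pgn_text out) := by unfold Spec_split_pgn_blocks; infer_instance

-- ===== CLAIM (what is proved, stated in full; the proofs are below) =====
def Claim_equal_split_pgn_blocks : Prop := ∀ (pgn_text : String), Dom_split_pgn_blocks pgn_text → Spec_split_pgn_blocks pgn_text (split_pgn_blocks pgn_text)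

-- ===== LEMMAS AND PROOFS =====

theorem pvF_pos (st : List String × List String) (l : String)
    (h : (PySem.Str.startswith l "[Event " && !st.2.isEmpty) = true) :
    pvF st l = (st.1 ++ [pvJS st.2], [l]) := by
  unfold pvF; rw [if_pos h]

theorem pvF_neg (st : List String × List String) (l : String)
    (h : ¬ (PySem.Str.startswith l "[Event " && !st.2.isEmpty) = true) :
    pvF st l = (st.1, st.2 ++ [l]) := by
  unfold pvF; rw [if_neg h]

-- A's fold accumulates its blocks list as a pure prefix
theorem pvFoldl_prefix (ls : List String) (blocks cur : List String) :
    ls.foldl pvF (blocks, cur)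
      = (blocks ++ (ls.foldl pvF ([], cur)).1, (ls.foldl pvF ([], cur)).2) := by
  induction ls generalizing blocks cur with
  | nil => simp
  | cons l ls ih =>
    simp only [List.foldl_cons]
    by_cases h : (PySem.Str.startswith l "[Event " && !cur.isEmpty) = true
    · rw [pvF_pos (blocks, cur) l h, pvF_pos ([], cur) l h]
      simp only [List.nil_append]
      rw [ih (blocks ++ [pvJS cur]) [l], ih [pvJS cur] [l]]
      simp [List.append_assoc]
    · rw [pvF_neg (blocks, cur) l h, pvF_neg ([], cur) l h]
      exact ih blocks (cur ++ [l])

-- main invariant: A's flush-and-filter equals B's chunking, for a nonempty buffer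
theorem pvMain (ls : List String) (cur : List String) (hcur : cur ≠ []) :
    (pvFinish (ls.foldl pvF ([], cur))).filter (fun b => b ≠ "")
      = (if pvJS (cur ++ ls.takeWhile pvNotEvent) = "" then []
          else [pvJS (cur ++ ls.takeWhile pvNotEvent)]) ++ pvChunks (ls.dropWhile pvNotEvent) := by
  induction ls generalizing cur with
  | nil =>
    simp only [List.foldl_nil, List.takeWhile_nil, List.dropWhile_nil, List.append_nil, pvChunks,
      pvFinish]
    rw [if_pos (by simp [hcur])]
    by_cases h : pvJS cur = "" <;> simp [h, List.filter]
  | cons l ls ih =>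
    simp only [List.foldl_cons]
    by_cases hE : PySem.Str.startswith l "[Event " = true
    · have hc : (PySem.Str.startswith l "[Event " && !cur.isEmpty) = true := by
        rw [hE]
        cases cur with
        | nil => exact absurd rfl hcur
        | cons a t => rfl
      have hne : pvNotEvent l = false := by unfold pvNotEvent; rw [hE]; rfl
      rw [pvF_pos ([], cur) l hc]
      simp only [List.nil_append]
      rw [pvFoldl_prefix ls [pvJS cur] [l]]
      have hfin : pvFinish ([pvJS cur] ++ (ls.foldl pvF ([], [l])).1, (ls.foldl pvF ([], [l])).2)
          = [pvJS cur] ++ pvFinish (ls.foldl pvF ([], [l])) := by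
        unfold pvFinish
        by_cases h2 : (!(ls.foldl pvF ([], [l])).2.isEmpty) = true
        · rw [if_pos h2, if_pos h2, List.append_assoc]
        · rw [if_neg h2, if_neg h2]
      rw [hfin, List.filter_append, ih [l] (by simp)]
      rw [List.takeWhile_cons_of_neg (by rw [hne]; exact Bool.false_ne_true),
        List.dropWhile_cons_of_neg (by rw [hne]; exact Bool.false_ne_true)]
      conv_rhs => rw [pvChunks]
      simp only [List.append_nil, List.singleton_append]
      by_cases h : pvJS cur = "" <;>
        simp [h, List.filter]
    · have hne : pvNotEvent l = true := by
        unfold pvNotEvent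
        cases hb : PySem.Str.startswith l "[Event " with
        | false => rfl
        | true => exact absurd hb hE
      have hc : ¬ (PySem.Str.startswith l "[Event " && !cur.isEmpty) = true := by
        intro hcontra
        exact hE (Bool.and_elim_left hcontra)
      rw [pvF_neg ([], cur) l hc]
      rw [ih (cur ++ [l]) (by simp)]
      rw [List.takeWhile_cons_of_pos hne, List.dropWhile_cons_of_pos hne]
      simp [List.append_assoc]

theorem pvCore (lines : List String) :
    (pvFinish (lines.foldl pvF ([], []))).filter (fun b => b ≠ "") = pvChunks lines := by
  cases lines with
  | nil => simp [pvFinish, pvChunks]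
  | cons l rest =>
    simp only [List.foldl_cons]
    rw [pvF_neg ([], []) l (by simp)]
    simp only [List.nil_append]
    rw [pvMain rest [l] (by simp)]
    conv_rhs => rw [pvChunks]
    simp [pvJS]

-- ===== VERDICT (by name: the statement is the Claim_ definition above) =====
theorem split_pgn_blocks_spec : Claim_equal_split_pgn_blocks := by
  intro pgn_text _
  unfold Spec_split_pgn_blocks
  simp only [split_pgn_blocks, split_pgn_blocks_alt]
  by_cases h : PySem.Str.strip
      (PySem.Str.replace (PySem.Str.replace pgn_text "\r\n" "\n") "\r" "\n") = ""
  · rw [if_pos h, if_pos h]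
  · rw [if_neg h, if_neg h]
    exact pvCore _
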